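-- pv_equiv track=rewrite | github.com/liujunsheng0/notes | lintcode/words-compression.py | wordsCompression
-- ===== SOURCE A (Python) =====
-- def wordsCompression(words):
--     s = ''
--     for w in words:
--         ok = True
--         for i in range(len(w), 0, -1):
--             if s.endswith(w[:i]):
--                 s += w[i:]
--                 ok = False
--                 break
--         # end for
--         if ok:
--             s += w
--     # end for
--     return [s.find(i) for i in words]
-- ===== SOURCE B (Python) =====
-- def _pi(t):
--     # KMP prefix function: pi[i] = length of the longest proper border of t[:i+1]
--     n = len(t)
--     pi = [0] * n
--     k = 0
--     for i in range(1, n):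
--         while k > 0 and t[k] != t[i]:
--             k = pi[k - 1]
--         if t[k] == t[i]:
--             k += 1
--         pi[i] = k
--     return pi
--
-- def wordsCompression(words):
--     # KMP with a sentinel: the max overlap of w onto s is the last prefix-function
--     # value of w + '\x00' + (suffix of s of length min(len(s), len(w))).
--     s = ''
--     for w in words:
--         m = min(len(s), len(w))
--         t = w + '\x00' + s[len(s) - m:]
--         s += w[_pi(t)[-1]:]
--     return [s.find(w) for w in words]
-- ===== Notes on version B (the rewrite author's own statement) =====
-- stated objective: alternative
-- what changed: A finds each word's maximal overlap by trying every candidate overlap length in descending order with s.endswith; B instead computes it as the last KMP prefix-function value of w + '\x00' + (suffix of s of length min(len(s),len(w))), the classic sentinel trick.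
import Mathlib
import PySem

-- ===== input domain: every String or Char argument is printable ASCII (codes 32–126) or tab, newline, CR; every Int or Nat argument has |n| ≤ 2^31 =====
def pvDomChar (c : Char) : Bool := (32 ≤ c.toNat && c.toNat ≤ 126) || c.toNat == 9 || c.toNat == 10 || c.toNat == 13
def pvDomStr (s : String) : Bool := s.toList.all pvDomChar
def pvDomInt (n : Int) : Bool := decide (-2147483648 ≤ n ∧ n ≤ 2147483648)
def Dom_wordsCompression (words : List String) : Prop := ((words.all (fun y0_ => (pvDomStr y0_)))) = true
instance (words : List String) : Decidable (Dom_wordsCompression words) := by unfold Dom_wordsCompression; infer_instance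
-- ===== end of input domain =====

-- B replaces A's descending endswith scan per word by the KMP prefix-function sentinel
-- trick: the overlap is the last prefix-function value of
-- w + '\x00' + (suffix of s of length min(len(s),len(w))). Objective: alternative.

-- ===== PORT A =====
-- inner 'for i in range(len(w), 0, -1): if s.endswith(w[:i]): s += w[i:]; break' with the
-- ok-flag fallback 's += w' folded into the empty-list case (the flag only records 'no break')
def wcInnerA (s w : String) : List Int → String
  | [] => s ++ w
  | i :: is =>
    if PySem.Str.endswith s (PySem.Str.slice w none (some i)) then
      s ++ PySem.Str.slice w (some i) none
    else wcInnerA s w is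

def wordsCompression (words : List String) : List Int :=
  let s := words.foldl
    (fun s w => wcInnerA s w (PySem.List.pyRange (PySem.Str.len w) 0 (-1))) ""
  words.map (fun w => PySem.Str.find s w)

-- ===== PORT B =====
-- 'while k > 0 and t[k] != t[i]: k = pi[k-1]'; fuel = the current k bounds the iteration
-- count (each pass strictly decreases k, see the lemmas below); t[k] is always in range
-- here, so the getD default is never read.
def piWhile (t : List Char) (pi : List Nat) (ci : Char) : Nat → Nat → Nat
  | 0, k => k
  | fuel+1, k =>
    if 0 < k ∧ t.getD k ' ' ≠ ci then piWhile t pi ci fuel (pi.getD (k-1) 0) else k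

-- one iteration of _pi's 'for i in range(1, n)' loop, state = (pi, k)
def piStep (t : List Char) (st : List Nat × Nat) (i : Nat) : List Nat × Nat :=
  let k1 := piWhile t st.1 (t.getD i ' ') st.2 st.2
  let k2 := if t.getD k1 ' ' = t.getD i ' ' then k1 + 1 else k1
  (st.1.set i k2, k2)

-- _pi(t): pi = [0]*n; for i in range(1, n): ...
def piList (t : List Char) : List Nat :=
  ((List.range' 1 (t.length - 1)).foldl (piStep t) (List.replicate t.length 0, 0)).1

-- Source B's string concatenations building t are ported on the code-point list (exact);
-- _pi(t)[-1] is (piList t).getD (t.length - 1) 0 since t is never empty.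
def wordsCompression_alt (words : List String) : List Int :=
  let s := words.foldl (fun s w =>
      let m : Int := min (PySem.Str.len s) (PySem.Str.len w)
      let t : List Char := w.toList ++ '\x00' ::
        (PySem.Str.slice s (some (PySem.Str.len s - m)) none).toList
      s ++ PySem.Str.slice w (some (((piList t).getD (t.length - 1) 0 : Nat) : Int)) none) ""
  words.map (fun w => PySem.Str.find s w)

-- ===== PRECONDITION & SPEC =====
def Spec_wordsCompression (words : List String) (out : List Int) : Prop := out = wordsCompression_alt words
instance (words : List String) (out : List Int) : Decidable (Spec_wordsCompression words out) := by unfold Spec_wordsCompression; infer_instance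

-- ===== CLAIM (what is proved, stated in full; the proofs are below) =====
def Claim_equal_wordsCompression : Prop := ∀ (words : List String), Dom_wordsCompression words → Spec_wordsCompression words (wordsCompression words)

-- ===== LEMMAS AND PROOFS =====

-- proof-side: the largest i ≤ n with P i (0 if none)
def wcBest (P : Nat → Bool) : Nat → Nat
  | 0 => 0
  | n + 1 => if P (n + 1) then n + 1 else wcBest P n

theorem wcBest_agree (P : Nat → Bool) (m n : Nat) (hmn : m ≤ n)
    (h : ∀ i, m < i → i ≤ n → P i = false) : wcBest P n = wcBest P m := by
  induction n with
  | zero => rw [Nat.le_zero.mp hmn]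
  | succ n ih =>
    rcases Nat.eq_or_lt_of_le hmn with rfl | hlt
    · rfl
    · simp only [wcBest, h (n + 1) hlt (le_refl _)]
      simp only [Bool.false_eq_true, if_false]
      exact ih (by omega) (fun i h1 h2 => h i h1 (by omega))

theorem wcBest_le (P : Nat → Bool) (n : Nat) : wcBest P n ≤ n := by
  induction n with
  | zero => exact le_refl _
  | succ n ih => simp only [wcBest]; split_ifs <;> omega

theorem wcBest_true (P : Nat → Bool) (n : Nat) (h0 : P 0 = true) : P (wcBest P n) = true := by
  induction n with
  | zero => exact h0
  | succ n ih => simp only [wcBest]; split_ifs with h <;> simpa [h]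

theorem le_wcBest (P : Nat → Bool) (n b : Nat) (hb : b ≤ n) (h : P b = true) : b ≤ wcBest P n := by
  induction n with
  | zero => omega
  | succ n ih =>
    simp only [wcBest]
    split_ifs with hp
    · omega
    · rcases Nat.eq_or_lt_of_le hb with rfl | hlt
      · rw [h] at hp; exact absurd rfl hp
      · exact ih (by omega)

theorem wcBest_eq (P : Nat → Bool) (n k : Nat) (h0 : P 0 = true) (hk : k ≤ n) (hP : P k = true)
    (hmax : ∀ b, b ≤ n → P b = true → b ≤ k) : wcBest P n = k :=
  le_antisymm (hmax _ (wcBest_le P n) (wcBest_true P n h0)) (le_wcBest P n k hk hP)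

theorem wcBest_congr (P Q : Nat → Bool) (n : Nat) (h : ∀ b, b ≤ n → P b = Q b) :
    wcBest P n = wcBest Q n := by
  induction n with
  | zero => rfl
  | succ n ih =>
    simp only [wcBest, h (n+1) (le_refl _)]
    split_ifs
    · rfl
    · exact ih (fun b hb => h b (by omega))

-- ---- suffix toolkit ----

theorem suffix_concat_concat {u v : List Char} {a b : Char} :
    u ++ [a] <:+ v ++ [b] ↔ u <:+ v ∧ a = b := by
  rw [← List.reverse_prefix]
  simp only [List.reverse_append, List.reverse_singleton, List.singleton_append,
    List.cons_prefix_cons, List.reverse_prefix]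
  tauto

theorem suffix_of_suffix_le {l₁ l₂ l₃ : List Char} (h1 : l₁ <:+ l₃) (h2 : l₂ <:+ l₃)
    (h : l₁.length ≤ l₂.length) : l₁ <:+ l₂ := by
  rw [← List.reverse_prefix] at h1 h2 ⊢
  exact List.prefix_of_prefix_length_le h1 h2 (by simpa)

theorem suffix_append_iff {u x y : List Char} (h : u.length ≤ y.length) :
    u <:+ x ++ y ↔ u <:+ y :=
  ⟨fun h' => suffix_of_suffix_le h' (List.suffix_append x y) h,
   fun h' => h'.trans (List.suffix_append x y)⟩

theorem take_succ_getD (l : List Char) (i : Nat) (h : i < l.length) :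
    l.take (i+1) = l.take i ++ [l.getD i ' '] := by
  rw [List.take_add_one]
  simp [List.getD_eq_getElem?_getD, List.getElem?_eq_getElem h]

-- border extension: a nonempty border of t[:i+1] is a border of t[:i] extended by a matching char
theorem border_ext (t : List Char) (i b : Nat) (hi : i < t.length) (hb1 : 1 ≤ b) (hbi : b ≤ i) :
    (t.take b <:+ t.take (i+1)) ↔
      (t.take (b-1) <:+ t.take i ∧ t.getD (b-1) ' ' = t.getD i ' ') := by
  have h1 : t.take b = t.take (b-1) ++ [t.getD (b-1) ' '] := by
    have h := take_succ_getD t (b-1) (by omega)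
    rwa [Nat.sub_add_cancel hb1] at h
  rw [h1, take_succ_getD t i hi, suffix_concat_concat]

-- the longest proper border of t[:i]
def bord (t : List Char) (i : Nat) : Nat :=
  wcBest (fun b => decide (t.take b <:+ t.take i)) (i - 1)

theorem bord_le (t : List Char) (i : Nat) : bord t i ≤ i - 1 := wcBest_le _ _

theorem bord_suffix (t : List Char) (i : Nat) : t.take (bord t i) <:+ t.take i := by
  have := wcBest_true (fun b => decide (t.take b <:+ t.take i)) (i - 1) (by simp)
  simpa using this

theorem le_bord (t : List Char) (i b : Nat) (hb : b ≤ i - 1) (h : t.take b <:+ t.take i) :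
    b ≤ bord t i := le_wcBest _ _ _ hb (by simpa)

-- once the while loop has stopped at k, the conditional increment yields bord t (i+1)
theorem piExit (t : List Char) (i k : Nat) (hi : i < t.length)
    (hks : t.take k <:+ t.take i) (hki : k < i)
    (hmax : ∀ b, b < i → t.take b <:+ t.take i → t.getD b ' ' = t.getD i ' ' → b ≤ k)
    (hstop : k = 0 ∨ t.getD k ' ' = t.getD i ' ') :
    (if t.getD k ' ' = t.getD i ' ' then k + 1 else k) = bord t (i+1) := by
  by_cases hck : t.getD k ' ' = t.getD i ' '
  · rw [if_pos hck]
    symm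
    unfold bord
    rw [show i + 1 - 1 = i from rfl]
    apply wcBest_eq
    · simp
    · omega
    · rw [decide_eq_true_iff]
      refine (border_ext t i (k+1) hi (by omega) (by omega)).mpr ?_
      simpa using And.intro hks hck
    · intro b hb hP
      rcases Nat.eq_zero_or_pos b with rfl | hb1
      · omega
      · rw [decide_eq_true_iff] at hP
        have h2 := (border_ext t i b hi (by omega) hb).mp hP
        have hble := hmax (b-1) (by omega) h2.1 h2.2
        omega
  · rw [if_neg hck]
    have hk0 : k = 0 := hstop.resolve_right hck
    subst hk0
    symm
    unfold bord
    rw [show i + 1 - 1 = i from rfl]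
    apply wcBest_eq
    · simp
    · omega
    · simp
    · intro b hb hP
      rcases Nat.eq_zero_or_pos b with rfl | hb1
      · omega
      · rw [decide_eq_true_iff] at hP
        have h2 := (border_ext t i b hi (by omega) hb).mp hP
        have hble := hmax (b-1) (by omega) h2.1 h2.2
        have hb0 : b - 1 = 0 := by omega
        rw [hb0] at h2
        exact absurd h2.2 hck

-- KMP step correctness: the while loop followed by the conditional increment
-- computes the longest proper border of t[:i+1]
theorem piStep_eq (t : List Char) (pi : List Nat) (i : Nat) (hi : i < t.length)
    (hpi : ∀ j, j < i → pi.getD j 0 = bord t (j+1)) :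
    ∀ fuel k, k ≤ fuel → t.take k <:+ t.take i → k < i →
      (∀ b, b < i → t.take b <:+ t.take i → t.getD b ' ' = t.getD i ' ' → b ≤ k) →
      (if t.getD (piWhile t pi (t.getD i ' ') fuel k) ' ' = t.getD i ' '
       then piWhile t pi (t.getD i ' ') fuel k + 1
       else piWhile t pi (t.getD i ' ') fuel k) = bord t (i+1) := by
  intro fuel
  induction fuel with
  | zero =>
    intro k hk hks hki hmax
    have hk0 : k = 0 := by omega
    subst hk0
    exact piExit t i 0 hi hks hki hmax (Or.inl rfl)
  | succ fuel ih =>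
    intro k hk hks hki hmax
    by_cases hc : 0 < k ∧ t.getD k ' ' ≠ t.getD i ' '
    · have hk1 : k - 1 < i := by omega
      have hpik : pi.getD (k-1) 0 = bord t k := by
        have h := hpi (k-1) hk1
        rwa [Nat.sub_add_cancel (by omega)] at h
      rw [show piWhile t pi (t.getD i ' ') (fuel+1) k
            = piWhile t pi (t.getD i ' ') fuel (pi.getD (k-1) 0) from by
          rw [piWhile]; rw [if_pos hc]]
      rw [hpik]
      have hblek : bord t k ≤ k - 1 := bord_le t k
      apply ih
      · omega
      · exact (bord_suffix t k).trans hks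
      · omega
      · intro b hb hbs hbc
        have hbk : b ≤ k := hmax b hb hbs hbc
        have hbk' : b < k := lt_of_le_of_ne hbk (fun he => hc.2 (he ▸ hbc))
        have hbsk : t.take b <:+ t.take k :=
          suffix_of_suffix_le hbs hks (by simp [List.length_take]; omega)
        exact le_bord t k b (by omega) hbsk
    · have hstop : piWhile t pi (t.getD i ' ') (fuel+1) k = k := by
        rw [piWhile]; rw [if_neg hc]
      rw [hstop]
      apply piExit t i k hi hks hki hmax
      by_cases h0 : k = 0
      · exact Or.inl h0
      · right; by_contra hne; exact hc ⟨by omega, hne⟩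

theorem getD_set_eq (l : List Nat) (i p v : Nat) (hi : i < l.length) :
    (l.set i v).getD p 0 = if i = p then v else l.getD p 0 := by
  simp only [List.getD_eq_getElem?_getD, List.getElem?_set, hi, if_true]
  split_ifs <;> simp

-- fold invariant for _pi's main loop
theorem piFold_inv (t : List Char) : ∀ j, j < t.length →
    ((List.range' 1 j).foldl (piStep t) (List.replicate t.length 0, 0)).1.length = t.length ∧
    ((List.range' 1 j).foldl (piStep t) (List.replicate t.length 0, 0)).2 = bord t (j+1) ∧
    ∀ p, p < t.length →
      ((List.range' 1 j).foldl (piStep t) (List.replicate t.length 0, 0)).1.getD p 0 =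
        if p ≤ j ∧ p ≠ 0 then bord t (p+1) else 0 := by
  intro j
  induction j with
  | zero =>
    intro hj
    refine ⟨by simp, rfl, ?_⟩
    intro p hp
    have hno : ¬ (p ≤ 0 ∧ p ≠ 0) := by omega
    rw [if_neg hno]
    show (List.replicate t.length 0).getD p 0 = 0
    exact List.getD_replicate _ hp
  | succ j ih =>
    intro hj
    obtain ⟨hlen, hsnd, hget⟩ := ih (by omega)
    rw [List.range'_1_concat, List.foldl_append, List.foldl_cons, List.foldl_nil]
    set st := (List.range' 1 j).foldl (piStep t) (List.replicate t.length 0, 0) with hst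
    have hi : 1 + j < t.length := by omega
    have hieq : (1 + j) = j + 1 := by omega
    have hpi : ∀ j', j' < 1 + j → st.1.getD j' 0 = bord t (j'+1) := by
      intro j' hj'
      rw [hget j' (by omega)]
      rcases Nat.eq_zero_or_pos j' with rfl | hpos
      · simp [bord, wcBest]
      · rw [if_pos ⟨by omega, by omega⟩]
    have hk2 : (if t.getD (piWhile t st.1 (t.getD (1+j) ' ') st.2 st.2) ' ' = t.getD (1+j) ' '
       then piWhile t st.1 (t.getD (1+j) ' ') st.2 st.2 + 1
       else piWhile t st.1 (t.getD (1+j) ' ') st.2 st.2) = bord t (1+j+1) := by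
      apply piStep_eq t st.1 (1+j) hi hpi st.2 st.2 (le_refl _)
      · rw [hsnd, hieq]; exact bord_suffix t (j+1)
      · rw [hsnd]; have := bord_le t (j+1); omega
      · intro b hb hbs _
        rw [hsnd]
        apply le_bord t (j+1) b (by omega)
        rw [hieq] at hbs; exact hbs
    refine ⟨?_, ?_, ?_⟩
    · simp [piStep, hlen]
    · simp only [piStep]
      rw [hk2, hieq]
    · intro p hp
      simp only [piStep]
      rw [getD_set_eq _ _ _ _ (by omega), hk2]
      by_cases hpj : (1 + j) = p
      · rw [if_pos hpj, if_pos (by omega), ← hpj, hieq]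
      · rw [if_neg hpj, hget p hp]
        by_cases hc : p ≤ j ∧ p ≠ 0
        · rw [if_pos hc, if_pos ⟨by omega, hc.2⟩]
        · rw [if_neg hc, if_neg (by omega)]

theorem piList_last (t : List Char) (ht : t ≠ []) :
    (piList t).getD (t.length - 1) 0 = bord t t.length := by
  have hlen : 0 < t.length := List.length_pos_iff.mpr ht
  obtain ⟨_, _, hget⟩ := piFold_inv t (t.length - 1) (by omega)
  unfold piList
  rw [hget (t.length - 1) (by omega)]
  rcases Nat.eq_or_lt_of_le hlen with h1 | h1
  · rw [if_neg (by omega)]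
    rw [show t.length = 1 from by omega]
    simp [bord, wcBest]
  · rw [if_pos ⟨le_refl _, by omega⟩]
    congr 1
    omega

theorem idxOf_sep (x : List Char) : ∀ (u : List Char), '\x00' ∉ u →
    List.idxOf '\x00' (u ++ '\x00' :: x) = u.length := by
  intro u
  induction u with
  | nil => intro _; simpa using List.idxOf_cons_self
  | cons c u ih =>
    intro hu
    have hc : c ≠ '\x00' := fun h => hu (by simp [h])
    simp only [List.cons_append, List.idxOf_cons_ne _ hc,
      ih (fun h => hu (List.mem_cons_of_mem _ h)), List.length_cons]

-- the sentinel trick: with '\x00' in neither w nor s, the longest proper border of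
-- w ++ '\x00' :: (suffix of s of length m) is the largest k ≤ m with w[:k] a suffix of s
theorem bord_sentinel (s w : List Char) (hs : '\x00' ∉ s) (hw : '\x00' ∉ w) :
    bord (w ++ '\x00' :: s.drop (s.length - min s.length w.length))
        (w ++ '\x00' :: s.drop (s.length - min s.length w.length)).length
      = wcBest (fun k => decide (w.take k <:+ s)) (min s.length w.length) := by
  set m := min s.length w.length with hm
  set win := s.drop (s.length - m) with hwin
  set t := w ++ '\x00' :: win with ht
  have hms : m ≤ s.length := Nat.min_le_left _ _
  have hmw : m ≤ w.length := Nat.min_le_right _ _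
  have hwinlen : win.length = m := by rw [hwin, List.length_drop]; omega
  have htlen : t.length = w.length + 1 + m := by simp [ht, hwinlen]; omega
  have hfalse : ∀ b, m < b → b ≤ w.length + m →
      (decide (t.take b <:+ t) : Bool) = false := by
    intro b hb1 hb2
    apply decide_eq_false
    intro hsuf
    have hblen : (t.take b).length = b := by rw [List.length_take]; omega
    have heq : t.take b = t.drop (t.length - b) := by
      have h := List.suffix_iff_eq_drop.mp hsuf
      rwa [hblen] at h
    have hdle : t.length - b ≤ w.length := by omega
    have hdrop : t.drop (t.length - b) = w.drop (t.length - b) ++ '\x00' :: win := by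
      rw [ht, List.drop_append_of_le_length hdle]
    by_cases hbw : b ≤ w.length
    · have htake : t.take b = w.take b := by rw [ht, List.take_append_of_le_length hbw]
      have hmem : '\x00' ∈ w.take b := by
        rw [htake] at heq; rw [heq, hdrop]; simp
      exact hw (List.mem_of_mem_take hmem)
    · have htake : t.take b = w ++ '\x00' :: win.take (b - w.length - 1) := by
        rw [ht, List.take_append, List.take_of_length_le (by omega)]
        congr 1
        rw [show b - w.length = (b - w.length - 1) + 1 from by omega]
        simp
      have hidx1 : List.idxOf '\x00' (t.take b) = w.length := by
        rw [htake]; exact idxOf_sep _ w hw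
      have hidx2 : List.idxOf '\x00' (t.drop (t.length - b)) = w.length - (t.length - b) := by
        rw [hdrop, idxOf_sep _ _ (fun h => hw (List.mem_of_mem_drop h)), List.length_drop]
      rw [heq, hidx2] at hidx1
      omega
  have hsmall : ∀ b, b ≤ m →
      (decide (t.take b <:+ t) : Bool) = decide (w.take b <:+ s) := by
    intro b hb
    rw [decide_eq_decide]
    have htake : t.take b = w.take b := by rw [ht, List.take_append_of_le_length (by omega)]
    rw [htake]
    have hblen : (w.take b).length = b := by rw [List.length_take]; omega
    have ht2 : t = (w ++ ['\x00']) ++ win := by simp [ht]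
    rw [ht2, suffix_append_iff (by omega)]
    constructor
    · intro h; exact h.trans (List.drop_suffix _ _)
    · intro h
      exact suffix_of_suffix_le h (List.drop_suffix _ _) (by omega)
  have hb0 : bord t t.length = wcBest (fun b => decide (t.take b <:+ t)) (w.length + m) := by
    unfold bord
    rw [List.take_length, htlen, show w.length + 1 + m - 1 = w.length + m from by omega]
  rw [hb0]
  rw [wcBest_agree _ m (w.length + m) (by omega) (fun i h1 h2 => hfalse i h1 h2)]
  exact wcBest_congr _ _ m (fun b hb => hsmall b hb)

-- ---- A's inner downward scan computes the same maximum ----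

theorem slice_from_zero (w : String) : PySem.Str.slice w (some ((0 : Nat) : Int)) none = w := by
  apply String.ext
  simp [PySem.Str.toList_slice, pysem]

theorem wcInnerA_eq (s w : String) (n : Nat) :
    wcInnerA s w (PySem.List.pyRange (n : Int) 0 (-1)) =
      s ++ PySem.Str.slice w
        (some ((wcBest (fun k => decide (w.toList.take k <:+ s.toList)) n : Nat) : Int)) none := by
  induction n with
  | zero =>
    rw [PySem.List.pyRange_neg_one_eq_nil (by omega)]
    simp only [wcInnerA, wcBest, Nat.cast_zero]
    rw [show ((0 : Int) = ((0 : Nat) : Int)) by norm_num, slice_from_zero]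
  | succ n ih =>
    rw [PySem.List.pyRange_neg_one_cons (by push_cast; omega)]
    have hstep : (((n + 1 : Nat) : Int) - 1) = ((n : Nat) : Int) := by push_cast; ring
    have hcond : PySem.Str.endswith s (PySem.Str.slice w none (some ((n + 1 : Nat) : Int)))
        = decide (w.toList.take (n+1) <:+ s.toList) := by
      rw [Bool.eq_iff_iff, decide_eq_true_iff]
      simp only [PySem.Str.endswith_eq, PySem.Str.toList_slice, PySem.Chars.slice_eq_listSlice,
        PySem.List.slice_to_natCast, PySem.Chars.endswith_iff]
    simp only [wcInnerA, hstep, hcond]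
    by_cases h : (w.toList.take (n+1) <:+ s.toList)
    · simp [wcBest, h]
    · simp only [h, if_false, wcBest, decide_false, Bool.false_eq_true, ih]

-- an overlap longer than s never matches, so A's scan bound |w| may be lowered to min
theorem ovP_false_of_big (s w : String) (i : Nat) (hi : i ≤ w.toList.length)
    (hs : s.toList.length < i) :
    decide (w.toList.take i <:+ s.toList) = false := by
  apply decide_eq_false
  intro h
  have hlen := List.IsSuffix.length_le h
  rw [List.length_take] at hlen
  omega

theorem stepA_eq (s w : String) :
    wcInnerA s w (PySem.List.pyRange (PySem.Str.len w) 0 (-1)) =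
      s ++ PySem.Str.slice w
        (some ((wcBest (fun k => decide (w.toList.take k <:+ s.toList))
                 (min s.toList.length w.toList.length) : Nat) : Int)) none := by
  rw [PySem.Str.len_eq, wcInnerA_eq]
  rw [wcBest_agree (fun k => decide (w.toList.take k <:+ s.toList))
    (min s.toList.length w.toList.length) w.toList.length (Nat.min_le_right _ _)
    (fun i h1 h2 => ovP_false_of_big s w i h2 (by omega))]

-- ---- B's per-word index equals the same maximum ----

theorem stepB_index (s w : String) (hs : '\x00' ∉ s.toList) (hw : '\x00' ∉ w.toList) :
    (piList (w.toList ++ '\x00' ::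
        (PySem.Str.slice s (some (PySem.Str.len s - min (PySem.Str.len s) (PySem.Str.len w))) none).toList)).getD
      ((w.toList ++ '\x00' ::
        (PySem.Str.slice s (some (PySem.Str.len s - min (PySem.Str.len s) (PySem.Str.len w))) none).toList).length - 1) 0
      = wcBest (fun k => decide (w.toList.take k <:+ s.toList)) (min s.toList.length w.toList.length) := by
  have hcast : PySem.Str.len s - min (PySem.Str.len s) (PySem.Str.len w)
      = ((s.toList.length - min s.toList.length w.toList.length : Nat) : Int) := by
    rw [PySem.Str.len_eq, PySem.Str.len_eq]
    push_cast
    omega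
  have hsl : (PySem.Str.slice s (some (PySem.Str.len s - min (PySem.Str.len s) (PySem.Str.len w))) none).toList
      = s.toList.drop (s.toList.length - min s.toList.length w.toList.length) := by
    rw [hcast, PySem.Str.toList_slice, PySem.Chars.slice_eq_listSlice, PySem.List.slice_from_natCast]
  rw [hsl]
  have hne : (w.toList ++ '\x00' ::
      s.toList.drop (s.toList.length - min s.toList.length w.toList.length)) ≠ [] := by simp
  rw [piList_last _ hne]
  exact bord_sentinel s.toList w.toList hs hw

theorem dom_no_sep (w : String) (h : pvDomStr w = true) : '\x00' ∉ w.toList := by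
  intro hmem
  have hc := List.all_eq_true.mp h _ hmem
  simp [pvDomChar] at hc

-- the two merge folds produce the same string
theorem fold_merge_eq : ∀ (words : List String) (s : String), '\x00' ∉ s.toList →
    words.all pvDomStr = true →
    words.foldl (fun s w => wcInnerA s w (PySem.List.pyRange (PySem.Str.len w) 0 (-1))) s =
    words.foldl (fun s w =>
      let m : Int := min (PySem.Str.len s) (PySem.Str.len w)
      let t : List Char := w.toList ++ '\x00' ::
        (PySem.Str.slice s (some (PySem.Str.len s - m)) none).toList
      s ++ PySem.Str.slice w (some (((piList t).getD (t.length - 1) 0 : Nat) : Int)) none) s := by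
  intro words
  induction words with
  | nil => intro s _ _; rfl
  | cons w ws ih =>
    intro s hs hdom
    rw [List.all_cons, Bool.and_eq_true] at hdom
    have hw : '\x00' ∉ w.toList := dom_no_sep w hdom.1
    simp only [List.foldl_cons]
    have hstep : wcInnerA s w (PySem.List.pyRange (PySem.Str.len w) 0 (-1)) =
        (let m : Int := min (PySem.Str.len s) (PySem.Str.len w)
         let t : List Char := w.toList ++ '\x00' ::
           (PySem.Str.slice s (some (PySem.Str.len s - m)) none).toList
         s ++ PySem.Str.slice w (some (((piList t).getD (t.length - 1) 0 : Nat) : Int)) none) := by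
      show wcInnerA s w (PySem.List.pyRange (PySem.Str.len w) 0 (-1)) =
        s ++ PySem.Str.slice w (some ((((piList _).getD (_ - 1) 0 : Nat)) : Int)) none
      rw [stepA_eq, stepB_index s w hs hw]
    rw [hstep]
    apply ih
    · rw [String.toList_append]
      intro hmem
      rcases List.mem_append.mp hmem with h | h
      · exact hs h
      · rw [PySem.Str.toList_slice, PySem.Chars.slice_eq_listSlice] at h
        exact hw (PySem.List.mem_of_mem_slice _ _ _ h)
    · exact hdom.2

-- ===== VERDICT (by name: the statement is the Claim_ definition above) =====
theorem wordsCompression_spec : Claim_equal_wordsCompression := by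
  intro words hdom
  unfold Spec_wordsCompression wordsCompression wordsCompression_alt
  rw [fold_merge_eq words "" (by simp) hdom]
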